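-- pv_equiv track=rewrite | github.com/cirosantilli/project-euler-solvers | solvers/185.py | solve_bruteforce
-- ===== SOURCE A (Python) =====
-- def solve_bruteforce(guesses: list[tuple[str, int]]) -> str:
--     length = len(guesses[0][0])
--     for value in range(10**length):
--         candidate = str(value).zfill(length)
--         ok = True
--         for guess, matches in guesses:
--             same = sum(1 for a, b in zip(candidate, guess) if a == b)
--             if same != matches:
--                 ok = False
--                 break
--         if ok:
--             return candidate
--     return ""
-- ===== SOURCE B (Python) =====
-- def solve_bruteforce(guesses: list[tuple[str, int]]) -> str:
--     length = len(guesses[0][0])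
--
--     def feasible(counts, pos):
--         for (g, m), c in zip(guesses, counts):
--             rem = min(length, len(g)) - pos
--             if rem < 0:
--                 rem = 0
--             if not (c <= m <= c + rem):
--                 return False
--         return True
--
--     def dfs(prefix, counts, pos):
--         if not feasible(counts, pos):
--             return None
--         if pos == length:
--             return ''.join(prefix)
--         for d in "0123456789":
--             new_counts = [c + (1 if pos < len(g) and g[pos] == d else 0)
--                           for (g, _), c in zip(guesses, counts)]
--             r = dfs(prefix + [d], new_counts, pos + 1)
--             if r is not None:
--                 return r
--         return None
--
--     r = dfs([], [0] * len(guesses), 0)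
--     return r if r is not None else ""
-- ===== Notes on version B (the rewrite author's own statement) =====
-- stated objective: faster
-- what changed: Replaced the exhaustive scan of all 10^L numeric codes (str(v).zfill per candidate, checked against every guess) by a depth-first backtracking search that assigns digits position by position, maintains per-guess running match counts, and prunes any prefix whose counts can no longer reach the required match totals.
-- intended difference: When the first guess string is empty (declared code length 0) and every guess's match count equals what the one-character string '0' would score (1 if the guess starts with '0', else 0), A returns '0' -- an artefact of str(value).zfill(0) never yielding the empty string -- while B returns '' , the only code of length 0, which is the intended value. — e.g. on solve_bruteforce([("", 0)]): A returns "0", B returns ""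
import Mathlib
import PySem

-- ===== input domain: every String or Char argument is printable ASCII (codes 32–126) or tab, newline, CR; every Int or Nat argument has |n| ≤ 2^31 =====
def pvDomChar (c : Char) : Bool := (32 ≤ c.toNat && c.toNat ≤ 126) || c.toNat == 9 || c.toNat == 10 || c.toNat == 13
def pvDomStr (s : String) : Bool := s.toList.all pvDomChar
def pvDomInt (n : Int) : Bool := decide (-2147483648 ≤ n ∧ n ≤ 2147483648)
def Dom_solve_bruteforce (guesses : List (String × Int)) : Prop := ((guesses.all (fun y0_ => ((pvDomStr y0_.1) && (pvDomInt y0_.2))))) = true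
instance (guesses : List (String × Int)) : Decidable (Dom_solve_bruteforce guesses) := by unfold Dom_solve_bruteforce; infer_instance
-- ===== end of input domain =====

-- B replaces A's exhaustive scan of all 10^L zero-filled numeric codes by a pruned
-- digit-by-digit backtracking search (faster in a timing run; same return value
-- outside D_, where A's zfill(0) artefact yields "0" for length-0 codes).


-- ===== PORT A =====
-- inner loop: 'same = sum(1 for a, b in zip(candidate, guess) if a == b)', break on mismatch
def sbA_ok (candidate : List Char) : List (String × Int) → Bool
  | [] => true
  | (g, m) :: rest =>
    let same : Int := ((candidate.zip g.toList).map (fun p => if p.1 = p.2 then (1 : Int) else 0)).sum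
    if same ≠ m then false else sbA_ok candidate rest

-- outer loop: 'for value in range(10**length): … return candidate' / fall through to ""
def sbA_loop (guesses : List (String × Int)) (length : Nat) : List Int → String
  | [] => ""
  | v :: rest =>
    let candidate := PySem.Str.zfill (PySem.Int.toStr v) (length : Int)
    if sbA_ok candidate.toList guesses then candidate else sbA_loop guesses length rest

def solve_bruteforce (guesses : List (String × Int)) : String :=
  let length : Nat := ((guesses.headD ("", 0)).1).toList.length
  sbA_loop guesses length (PySem.List.pyRange 0 ((10 : Int) ^ length) 1)

-- ===== PORT B =====
-- 'feasible(counts, pos)': every guess can still reach its required match count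
def sbB_feasible (guesses : List (String × Int)) (length : Nat) (counts : List Int) (pos : Nat) : Bool :=
  (guesses.zip counts).all (fun p =>
    let rem : Nat := min length p.1.1.toList.length - pos
    decide (p.2 ≤ p.1.2) && decide (p.1.2 ≤ p.2 + (rem : Int)))

-- 'dfs(pre, counts, pos)': try digits 0-9 at each position, prune infeasible prees
def sbB_dfs (guesses : List (String × Int)) (length : Nat) :
    Nat → List Char → List Int → Nat → Option (List Char)
  | fuel, pre, counts, pos =>
    if ¬ sbB_feasible guesses length counts pos then none
    else
      match fuel with
      | 0 => some pre
      | fuel' + 1 =>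
        ("0123456789".toList).findSome? (fun d =>
          sbB_dfs guesses length fuel' (pre ++ [d])
            ((guesses.zip counts).map (fun p =>
              p.2 + (if p.1.1.toList[pos]? = some d then (1 : Int) else 0)))
            (pos + 1))

def solve_bruteforce_alt (guesses : List (String × Int)) : String :=
  let length : Nat := ((guesses.headD ("", 0)).1).toList.length
  match sbB_dfs guesses length length [] (guesses.map (fun _ => (0 : Int))) 0 with
  | some cs => String.ofList cs
  | none => ""

-- ===== PRECONDITION & SPEC =====
-- Pre_ excludes only the empty guess list, on which A raises IndexError (guesses[0]).
def Pre_solve_bruteforce (guesses : List (String × Int)) : Prop := guesses ≠ []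
instance (guesses : List (String × Int)) : Decidable (Pre_solve_bruteforce guesses) := by unfold Pre_solve_bruteforce; infer_instance
def pvWitness_solve_bruteforce : (List (String × Int)) := [("12", 1)]

-- When the first guess string is empty (declared code length 0) and every guess's match
-- count equals what the one-character string "0" would score (1 if the guess starts with
-- '0', else 0), A returns "0" — an artefact of str(value).zfill(0) never yielding the
-- empty string — while B returns "", the only code of length 0, the intended value.
def D_solve_bruteforce (guesses : List (String × Int)) : Prop :=
  guesses ≠ [] ∧ (guesses.headD ("", 0)).1 = "" ∧
    ∀ p ∈ guesses, p.2 = (if p.1.toList[0]? = some '0' then (1 : Int) else 0)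
instance (guesses : List (String × Int)) : Decidable (D_solve_bruteforce guesses) := by unfold D_solve_bruteforce; infer_instance

def Spec_solve_bruteforce (guesses : List (String × Int)) (out : String) : Prop := ¬ D_solve_bruteforce guesses → out = solve_bruteforce_alt guesses
instance (guesses : List (String × Int)) (out : String) : Decidable (Spec_solve_bruteforce guesses out) := by unfold Spec_solve_bruteforce; infer_instance

def pvDiffWitness_solve_bruteforce : (List (String × Int)) := [("", 0)]
def pvDiffWitnessOut_solve_bruteforce : String × String := ("0", "")

-- ===== CLAIM (what is proved, stated in full; the proofs are below) =====
def Claim_unchanged_solve_bruteforce : Prop := ∀ (guesses : List (String × Int)), Dom_solve_bruteforce guesses → Pre_solve_bruteforce guesses → Spec_solve_bruteforce guesses (solve_bruteforce guesses)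
def Claim_changed_solve_bruteforce : Prop := Dom_solve_bruteforce (pvDiffWitness_solve_bruteforce) ∧ Pre_solve_bruteforce (pvDiffWitness_solve_bruteforce) ∧ D_solve_bruteforce (pvDiffWitness_solve_bruteforce) ∧ solve_bruteforce (pvDiffWitness_solve_bruteforce) = pvDiffWitnessOut_solve_bruteforce.1 ∧ solve_bruteforce_alt (pvDiffWitness_solve_bruteforce) = pvDiffWitnessOut_solve_bruteforce.2 ∧ pvDiffWitnessOut_solve_bruteforce.1 ≠ pvDiffWitnessOut_solve_bruteforce.2
def Claim_exact_solve_bruteforce : Prop := ∀ (guesses : List (String × Int)), Dom_solve_bruteforce guesses → Pre_solve_bruteforce guesses → D_solve_bruteforce guesses → solve_bruteforce guesses ≠ solve_bruteforce_alt guesses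

-- ===== LEMMAS AND PROOFS =====

-- the ten digit characters, in the order B tries them (proof-side name)
def sbDigits : List Char := "0123456789".toList

-- match count of a candidate prefix against one guess, as an Int

theorem sbCore_pull (f : Nat) : ∀ (n : Nat) (acc : List Char),
    Nat.toDigitsCore 10 f n acc = Nat.toDigitsCore 10 f n [] ++ acc := by
  induction f with
  | zero => intro n acc; simp [Nat.toDigitsCore]
  | succ f ih =>
    intro n acc
    simp only [Nat.toDigitsCore]
    by_cases h : n / 10 = 0
    · simp [h]
    · simp only [h, if_false]
      rw [ih (n/10) (Nat.digitChar (n % 10) :: acc), ih (n/10) [Nat.digitChar (n % 10)]]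
      simp

theorem sbCore_fuel (f : Nat) : ∀ (g n : Nat), n < 10^f → n < 10^g → 0 < f → 0 < g →
    Nat.toDigitsCore 10 f n [] = Nat.toDigitsCore 10 g n [] := by
  induction f with
  | zero => intro g n _ _ h; omega
  | succ f ih =>
    intro g n hf hg _ hg0
    obtain ⟨g', rfl⟩ : ∃ g', g = g' + 1 := ⟨g - 1, by omega⟩
    simp only [Nat.toDigitsCore]
    by_cases h : n / 10 = 0
    · simp [h]
    · simp only [h, if_false]
      rw [sbCore_pull f, sbCore_pull g']
      have hn10 : 10 ≤ n := by
        rcases Nat.lt_or_ge n 10 with h' | h'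
        · exact absurd (Nat.div_eq_of_lt h') h
        · exact h'
      rw [pow_succ'] at hf hg
      have h1 : n / 10 < 10 ^ f := Nat.div_lt_of_lt_mul hf
      have h2 : n / 10 < 10 ^ g' := Nat.div_lt_of_lt_mul hg
      have hf0 : 0 < f := by
        by_contra hf0
        have : f = 0 := by omega
        subst this; simp at h1; omega
      have hg0' : 0 < g' := by
        by_contra hg0'
        have : g' = 0 := by omega
        subst this; simp at h2; omega
      rw [ih g' (n/10) h1 h2 hf0 hg0']

theorem sbToDigits_small (v : Nat) (h : v < 10) : Nat.toDigits 10 v = [Nat.digitChar v] := by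
  simp [Nat.toDigits, Nat.toDigitsCore, Nat.div_eq_of_lt h, Nat.mod_eq_of_lt h]

theorem sbToDigits_step (n : Nat) (h : 10 ≤ n) :
    Nat.toDigits 10 n = Nat.toDigits 10 (n / 10) ++ [Nat.digitChar (n % 10)] := by
  have h0 : n / 10 ≠ 0 := by omega
  conv_lhs => rw [Nat.toDigits]
  simp only [Nat.toDigitsCore, h0, if_false]
  rw [sbCore_pull, Nat.toDigits]
  congr 1
  exact sbCore_fuel n (n/10 + 1) (n/10) (lt_of_lt_of_le (Nat.div_lt_self (by omega) (by omega))
      (le_of_lt (Nat.lt_pow_self (a := 10) (by norm_num))))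
    (lt_of_lt_of_le (Nat.lt_pow_self (a := 10) (by norm_num))
      (Nat.pow_le_pow_right (by norm_num) (by omega))) (by omega) (by omega)

theorem sb_digitChar_mem (v : Nat) (h : v < 10) : Nat.digitChar v ∈ sbDigits := by
  interval_cases v <;> decide

theorem sbToDigits_digits (v : Nat) : ∀ c ∈ Nat.toDigits 10 v, c ∈ sbDigits := by
  induction v using Nat.strong_induction_on with
  | _ v ih =>
    by_cases h : v < 10
    · rw [sbToDigits_small v h]
      simp only [List.mem_singleton]
      intro c hc; subst hc; exact sb_digitChar_mem v h
    · rw [sbToDigits_step v (by omega)]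
      intro c hc
      rcases List.mem_append.1 hc with hc | hc
      · exact ih (v/10) (Nat.div_lt_self (by omega) (by omega)) c hc
      · simp at hc
        subst hc
        have := Nat.mod_lt v (show 0 < 10 by omega)
        exact sb_digitChar_mem _ (Nat.mod_lt v (by omega))

-- zero-padded decimal representation, width L
def sbPad (L v : Nat) : List Char :=
  List.replicate (L - (Nat.toDigits 10 v).length) '0' ++ Nat.toDigits 10 v

theorem sbPad_length (L v : Nat) (hlt : v < 10 ^ L) (hL : 0 < L) : (sbPad L v).length = L := by
  have := Nat.toDigits_length 10 v L hL hlt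
  simp [sbPad]; omega

theorem sbPad_snoc (L r : Nat) (hL : 0 < L) :
    sbPad (L + 1) r = sbPad L (r / 10) ++ [Nat.digitChar (r % 10)] := by
  by_cases hr : r < 10
  · rw [sbPad, sbToDigits_small r hr]
    have h10 : r / 10 = 0 := Nat.div_eq_of_lt hr
    have hm : r % 10 = r := Nat.mod_eq_of_lt hr
    rw [sbPad, h10, hm, sbToDigits_small 0 (by omega)]
    simp only [List.length_singleton]
    have e1 : List.replicate (L - 1) '0' ++ [Nat.digitChar 0] = List.replicate L '0' := by
      have e0 : Nat.digitChar 0 = '0' := by decide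
      rw [e0, ← List.replicate_succ']
      congr 1; omega
    have e2 : L + 1 - 1 = L := by omega
    rw [e1, e2]
  · rw [sbPad, sbToDigits_step r (by omega), sbPad]
    rw [List.length_append, List.length_singleton, ← List.append_assoc]
    have e : L + 1 - ((Nat.toDigits 10 (r / 10)).length + 1)
        = L - (Nat.toDigits 10 (r / 10)).length := by omega
    rw [e]

theorem sbToDigits_lead (L : Nat) (hL : 0 < L) : ∀ d r, 1 ≤ d → d ≤ 9 → r < 10 ^ L →
    Nat.toDigits 10 (d * 10 ^ L + r) = Nat.digitChar d :: sbPad L r := by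
  induction L with
  | zero => omega
  | succ L ih =>
    intro d r hd1 hd9 hr
    by_cases hL0 : L = 0
    · subst hL0
      have hr : r < 10 := by simpa using hr
      have hv10 : 10 ≤ d * 10 ^ 1 + r := by rw [pow_one]; omega
      rw [sbToDigits_step _ hv10]
      have hdiv : (d * 10 ^ 1 + r) / 10 = d := by rw [pow_one]; omega
      have hmod : (d * 10 ^ 1 + r) % 10 = r := by rw [pow_one]; omega
      rw [hdiv, hmod, sbToDigits_small d (by omega), sbPad, sbToDigits_small r hr]
      simp
    · have hLpos : 0 < L := by omega
      have hv10 : 10 ≤ d * 10 ^ (L + 1) + r := by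
        have : 10 ≤ 10 ^ (L + 1) := by
          calc 10 = 10 ^ 1 := by norm_num
          _ ≤ 10 ^ (L + 1) := Nat.pow_le_pow_right (by norm_num) (by omega)
        nlinarith
      rw [sbToDigits_step _ hv10]
      have hdiv : (d * 10 ^ (L + 1) + r) / 10 = d * 10 ^ L + r / 10 := by
        rw [pow_succ]
        rw [show d * (10 ^ L * 10) + r = (d * 10 ^ L) * 10 + r by ring]
        omega
      have hmod : (d * 10 ^ (L + 1) + r) % 10 = r % 10 := by
        rw [pow_succ]
        rw [show d * (10 ^ L * 10) + r = (d * 10 ^ L) * 10 + r by ring]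
        omega
      have hr10 : r / 10 < 10 ^ L := by
        rw [pow_succ] at hr
        omega
      rw [hdiv, hmod, ih hLpos d (r/10) hd1 hd9 hr10, sbPad_snoc L r hLpos,
        List.cons_append]

theorem sbPad_split (L d r : Nat) (hL : 0 < L) (hd : d < 10) (hr : r < 10 ^ L) :
    sbPad (L + 1) (d * 10 ^ L + r) = Nat.digitChar d :: sbPad L r := by
  by_cases hd0 : d = 0
  · subst hd0
    simp only [Nat.zero_mul, Nat.zero_add]
    rw [sbPad, sbPad]
    have hlen := Nat.toDigits_length 10 r L hL hr
    have : L + 1 - (Nat.toDigits 10 r).length = (L - (Nat.toDigits 10 r).length) + 1 := by omega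
    rw [this, List.replicate_succ]
    rfl
  · rw [sbPad]
    have htd := sbToDigits_lead L hL d r (by omega) (by omega) hr
    rw [htd]
    have hlenpad : (sbPad L r).length = L := sbPad_length L r hr hL
    simp [hlenpad]

-- all digit strings of a given length, in lexicographic order
def allStrings : Nat → List (List Char)
  | 0 => [[]]
  | n + 1 => sbDigits.flatMap (fun d => (allStrings n).map (fun s => d :: s))

theorem sb_range_block (m : Nat) (f : Nat → List Char) : ∀ (k : Nat),
    (List.range (k * m)).map f
      = (List.range k).flatMap (fun d => (List.range m).map (fun r => f (d * m + r))) := by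
  intro k
  induction k with
  | zero => simp
  | succ k ih =>
    rw [show (k+1) * m = k * m + m by ring, List.range_add, List.map_append, ih,
      List.range_succ, List.flatMap_append]
    simp [List.map_map, Function.comp_def]

theorem sbDigits_eq : sbDigits = (List.range 10).map Nat.digitChar := by decide

theorem sb_mapA (L : Nat) (hL : 0 < L) :
    (List.range (10 ^ L)).map (sbPad L) = allStrings L := by
  induction L with
  | zero => omega
  | succ L ih =>
    by_cases hL0 : L = 0
    · subst hL0; decide
    · have hLpos : 0 < L := by omega
      rw [pow_succ, show 10 ^ L * 10 = 10 * 10 ^ L by ring,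
        sb_range_block (10 ^ L) (sbPad (L+1)) 10]
      rw [allStrings, ← ih hLpos, sbDigits_eq, List.flatMap_map]
      rw [List.flatMap_def, List.flatMap_def]
      congr 1
      apply List.map_congr_left
      intro d hd
      rw [List.map_map]
      apply List.map_congr_left
      intro r hr
      simp only [Function.comp_apply]
      exact sbPad_split L d r hLpos (List.mem_range.1 hd) (List.mem_range.1 hr)

def sbCnt (cs gl : List Char) : Int := ((cs.zip gl).countP (fun q => q.1 == q.2) : Int)

theorem sbA_ok_iff (gs : List (String × Int)) (cs : List Char) :
    sbA_ok cs gs = true ↔ ∀ p ∈ gs, sbCnt cs p.1.toList = p.2 := by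
  induction gs with
  | nil => simp [sbA_ok]
  | cons p rest ih =>
    obtain ⟨g, m⟩ := p
    simp only [sbA_ok]
    have hsum : ((cs.zip g.toList).map (fun p => if p.1 = p.2 then (1 : Int) else 0)).sum
        = sbCnt cs g.toList := by
      rw [sbCnt, ← PySem.List.sum_map_ite_one_zero (fun q => q.1 == q.2) (cs.zip g.toList)]
      congr 1
      apply List.map_congr_left
      intro q _
      by_cases h : q.1 = q.2 <;> simp [h]
    rw [hsum]
    by_cases h : sbCnt cs g.toList = m
    · simp [h, ih]
    · simp [h]

theorem sb_zip_append (a : List Char) : ∀ (b l : List Char),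
    (a ++ b).zip l = a.zip l ++ b.zip (l.drop a.length) := by
  induction a with
  | nil => simp
  | cons x a ih =>
    intro b l
    cases l with
    | nil => simp
    | cons y l => simp [ih]

theorem sbCnt_append (a b gl : List Char) :
    sbCnt (a ++ b) gl = sbCnt a gl + sbCnt b (gl.drop a.length) := by
  rw [sbCnt, sb_zip_append, List.countP_append]
  push_cast
  rfl

theorem sbCnt_singleton (d : Char) (gl : List Char) :
    sbCnt [d] gl = if gl[0]? = some d then (1 : Int) else 0 := by
  cases gl with
  | nil => simp [sbCnt]
  | cons c t =>
    simp only [sbCnt, List.zip_cons_cons, List.zip_nil_left, List.countP_cons, List.countP_nil,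
      List.getElem?_cons_zero]
    by_cases h : c = d
    · subst h; simp
    · simp [h, Ne.symm h, beq_iff_eq]

theorem sbCnt_nonneg (cs gl : List Char) : 0 ≤ sbCnt cs gl := by
  simp [sbCnt]

theorem sbCnt_le (cs gl : List Char) : sbCnt cs gl ≤ (min cs.length gl.length : Int) := by
  rw [sbCnt]
  have h1 := List.countP_le_length (l := cs.zip gl) (p := fun q => q.1 == q.2)
  have h2 : (cs.zip gl).length = min cs.length gl.length := List.length_zip
  omega

theorem sb_zip_map_self {α β : Type} (l : List α) (f : α → β) :
    l.zip (l.map f) = l.map (fun a => (a, f a)) := by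
  induction l with
  | nil => rfl
  | cons x t ih => simp [ih]

theorem sb_feas_iff (gs : List (String × Int)) (L : Nat) (f : String × Int → Int) (pos : Nat) :
    sbB_feasible gs L (gs.map f) pos = true
      ↔ ∀ p ∈ gs, f p ≤ p.2 ∧ p.2 ≤ f p + ((min L p.1.toList.length - pos : Nat) : Int) := by
  rw [sbB_feasible, sb_zip_map_self, List.all_map, List.all_eq_true]
  simp

theorem sb_newcounts (gs : List (String × Int)) (f : String × Int → Int) (pos : Nat) (d : Char) :
    ((gs.zip (gs.map f)).map (fun p => p.2 + (if p.1.1.toList[pos]? = some d then (1 : Int) else 0)))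
      = gs.map (fun p => f p + (if p.1.toList[pos]? = some d then (1 : Int) else 0)) := by
  rw [sb_zip_map_self, List.map_map]
  rfl

theorem sbCnt_snoc (pre : List Char) (d : Char) (gl : List Char) :
    sbCnt (pre ++ [d]) gl = sbCnt pre gl + (if gl[pre.length]? = some d then (1 : Int) else 0) := by
  rw [sbCnt_append, sbCnt_singleton, List.getElem?_drop, Nat.add_zero]

theorem sb_allStrings_length (n : Nat) : ∀ s ∈ allStrings n, s.length = n := by
  induction n with
  | zero => simp [allStrings]
  | succ n ih =>
    intro s hs
    simp only [allStrings, List.mem_flatMap, List.mem_map] at hs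
    obtain ⟨d, _, t, ht, rfl⟩ := hs
    simp [ih t ht]

theorem sb_sound (gs : List (String × Int)) (L : Nat) (pre : List Char) (fuel : Nat)
    (hfl : pre.length + fuel = L)
    (hfeas : sbB_feasible gs L (gs.map (fun p => sbCnt pre p.1.toList)) pre.length = false) :
    ∀ suff : List Char, suff.length = fuel → sbA_ok (pre ++ suff) gs = false := by
  intro suff hsuff
  rw [← Bool.not_eq_true, sbA_ok_iff]
  intro hall
  rw [← Bool.not_eq_true] at hfeas
  rw [sb_feas_iff] at hfeas
  apply hfeas
  intro p hp
  have htot := hall p hp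
  rw [sbCnt_append] at htot
  have h0 := sbCnt_nonneg suff (p.1.toList.drop pre.length)
  have h1 := sbCnt_le suff (p.1.toList.drop pre.length)
  rw [List.length_drop, hsuff] at h1
  omega

theorem sb_find_flatMap {α β : Type} (l : List α) (g : α → List β) (p : β → Bool) :
    (l.flatMap g).find? p = l.findSome? (fun a => (g a).find? p) := by
  induction l with
  | nil => rfl
  | cons a t ih =>
    rw [List.flatMap_cons, List.find?_append, List.findSome?_cons, ih]
    cases h : (g a).find? p <;> simp [Option.or]

set_option maxRecDepth 10000 in
theorem sb_dfs_eq (gs : List (String × Int)) (L : Nat) : ∀ (fuel : Nat) (pre : List Char),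
    pre.length + fuel = L →
    sbB_dfs gs L fuel pre (gs.map (fun p => sbCnt pre p.1.toList)) pre.length
      = ((allStrings fuel).map (pre ++ ·)).find? (fun cs => sbA_ok cs gs) := by
  intro fuel
  induction fuel with
  | zero =>
    intro pre h
    rw [sbB_dfs]
    have hfe : sbB_feasible gs L (gs.map (fun p => sbCnt pre p.1.toList)) pre.length = true
        ↔ sbA_ok pre gs = true := by
      rw [sb_feas_iff, sbA_ok_iff]
      apply forall_congr'
      intro p
      apply imp_congr_right
      intro _
      have hrem : min L p.1.toList.length - pre.length = 0 := by omega
      rw [hrem]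
      push_cast
      omega
    by_cases hok : sbA_ok pre gs = true
    · rw [if_neg (fun hc => hc (hfe.2 hok))]
      simp [allStrings, hok]
    · rw [if_pos (fun hc => hok (hfe.1 hc))]
      rw [Bool.not_eq_true] at hok
      simp [allStrings, hok]
  | succ fuel ih =>
    intro pre h
    rw [sbB_dfs]
    by_cases hfeas : sbB_feasible gs L (gs.map (fun p => sbCnt pre p.1.toList)) pre.length = true
    · rw [if_neg (fun hc => hc hfeas)]
      have hstep : ∀ d : Char,
          sbB_dfs gs L fuel (pre ++ [d])
              ((gs.zip (gs.map (fun p => sbCnt pre p.1.toList))).map (fun p =>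
                p.2 + (if p.1.1.toList[pre.length]? = some d then (1 : Int) else 0)))
              (pre.length + 1)
            = ((allStrings fuel).map ((pre ++ [d]) ++ ·)).find? (fun cs => sbA_ok cs gs) := by
        intro d
        have hc : ((gs.zip (gs.map (fun p => sbCnt pre p.1.toList))).map (fun p =>
                p.2 + (if p.1.1.toList[pre.length]? = some d then (1 : Int) else 0)))
            = gs.map (fun p => sbCnt (pre ++ [d]) p.1.toList) := by
          rw [sb_newcounts]
          apply List.map_congr_left
          intro p _
          rw [sbCnt_snoc]
        rw [hc]
        have hl : pre.length + 1 = (pre ++ [d]).length := by simp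
        rw [hl]
        exact ih (pre ++ [d]) (by simp; omega)
      simp only [hstep]
      rw [show allStrings (fuel + 1)
          = sbDigits.flatMap (fun d => (allStrings fuel).map (fun s => d :: s)) from rfl]
      rw [List.map_flatMap, sb_find_flatMap, sbDigits]
      simp only [List.map_map, Function.comp_def, List.append_assoc, List.singleton_append]
    · rw [if_pos (fun hc => hfeas hc)]
      symm
      rw [List.find?_eq_none]
      intro cs hcs
      simp only [List.mem_map] at hcs
      obtain ⟨suff, hsuff, rfl⟩ := hcs
      have := sb_sound gs L pre (fuel + 1) h (Bool.eq_false_iff.2 hfeas) suff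
        (sb_allStrings_length _ _ hsuff)
      simp [this]

theorem sbToDigits_ne_nil (v : Nat) : Nat.toDigits 10 v ≠ [] := by
  by_cases h : v < 10
  · rw [sbToDigits_small v h]; simp
  · rw [sbToDigits_step v (by omega)]; simp

theorem sb_zfill_pad (cs : List Char) (L : Nat) (hne : cs ≠ []) (hd : ∀ c ∈ cs, c ∈ sbDigits) :
    PySem.Chars.zfill cs (L : Int) = List.replicate (L - cs.length) '0' ++ cs := by
  unfold PySem.Chars.zfill
  by_cases hle : (L : Int) ≤ (cs.length : Int)
  · rw [if_pos hle]
    have : L - cs.length = 0 := by omega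
    rw [this]
    simp
  · rw [if_neg hle]
    cases cs with
    | nil => exact absurd rfl hne
    | cons c rest =>
      have hc := hd c List.mem_cons_self
      have hcn : ¬(c = '+' ∨ c = '-') := by
        intro hor
        rcases hor with rfl | rfl <;> revert hc <;> decide
      simp [hcn]

theorem sb_candA (L k : Nat) :
    (PySem.Str.zfill (PySem.Int.toStr (k : Int)) (L : Int)).toList = sbPad L k := by
  rw [PySem.Str.toList_zfill, PySem.Int.toList_toStr]
  have h1 : PySem.Int.toChars (k : Int) = Nat.toDigits 10 k := by
    simp [PySem.Int.toChars]
  rw [h1, sb_zfill_pad _ L (sbToDigits_ne_nil k) (sbToDigits_digits k), sbPad]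

theorem sbA_loop_eq (gs : List (String × Int)) (L : Nat) : ∀ vs : List Int,
    sbA_loop gs L vs
      = ((vs.map (fun v => PySem.Str.zfill (PySem.Int.toStr v) (L : Int))).find?
          (fun c => sbA_ok c.toList gs)).getD "" := by
  intro vs
  induction vs with
  | nil => rfl
  | cons v rest ih =>
    rw [sbA_loop, List.map_cons, List.find?_cons]
    by_cases hok : sbA_ok (PySem.Str.zfill (PySem.Int.toStr v) (L : Int)).toList gs = true
    · simp only [hok, if_true]
      rfl
    · rw [Bool.not_eq_true] at hok
      simp only [hok]
      simpa [hok] using ih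

theorem sb_pyRange_cast (L : Nat) :
    PySem.List.pyRange 0 ((10 : Int) ^ L) 1 = (List.range (10 ^ L)).map (fun k : Nat => (k : Int)) := by
  rw [PySem.List.pyRange_one]
  have h1 : ((10 : Int) ^ L - 0).toNat = 10 ^ L := by
    have e : (10 : Int) ^ L - 0 = ((10 ^ L : Nat) : Int) := by push_cast; ring
    rw [e, Int.toNat_natCast]
  rw [h1]
  simp

theorem sbA_char (gs : List (String × Int)) (L : Nat) (hL : 0 < L) :
    sbA_loop gs L (PySem.List.pyRange 0 ((10 : Int) ^ L) 1)
      = (((allStrings L).find? (fun cs => sbA_ok cs gs)).map String.ofList).getD "" := by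
  rw [sbA_loop_eq, sb_pyRange_cast, List.map_map]
  have h2 : (fun v => PySem.Str.zfill (PySem.Int.toStr v) (L : Int)) ∘ (fun k : Nat => (k : Int))
      = fun k : Nat => String.ofList (sbPad L k) := by
    funext k
    simp only [Function.comp_apply]
    rw [← sb_candA L k, String.ofList_toList]
  rw [h2, show (fun k : Nat => String.ofList (sbPad L k)) = String.ofList ∘ sbPad L from rfl,
    ← List.map_map, sb_mapA L hL, List.find?_map]
  have hp : ((fun c => sbA_ok c.toList gs) ∘ String.ofList) = fun cs => sbA_ok cs gs := by
    funext c
    simp [String.toList_ofList]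
  rw [hp]

theorem sbB_char (gs : List (String × Int)) (L : Nat) :
    sbB_dfs gs L L [] (gs.map (fun _ => (0 : Int))) 0
      = (allStrings L).find? (fun cs => sbA_ok cs gs) := by
  have h0 : gs.map (fun _ => (0 : Int)) = gs.map (fun p => sbCnt [] p.1.toList) := by
    apply List.map_congr_left
    intro p _
    simp [sbCnt]
  rw [h0]
  have h := sb_dfs_eq gs L L [] (by simp)
  simpa using h

-- B's result for length 0 is always ""
theorem sb_alt_L0 (p0 : String × Int) (rest : List (String × Int)) (h0 : p0.1.toList = []) :
    solve_bruteforce_alt (p0 :: rest) = "" := by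
  unfold solve_bruteforce_alt
  simp only [List.headD_cons, h0, List.length_nil]
  rw [sbB_char]
  by_cases hok : sbA_ok [] (p0 :: rest) = true
  · simp [allStrings, hok]
  · rw [Bool.not_eq_true] at hok
    simp [allStrings, hok]

theorem sb_A_L0 (p0 : String × Int) (rest : List (String × Int)) (h0 : p0.1.toList = []) :
    solve_bruteforce (p0 :: rest)
      = (if sbA_ok ['0'] (p0 :: rest) then "0" else "") := by
  unfold solve_bruteforce
  simp only [List.headD_cons, h0, List.length_nil]
  have hr : PySem.List.pyRange 0 ((10 : Int) ^ (0 : Nat)) 1 = [0] := by decide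
  rw [hr, sbA_loop]
  have hcand : PySem.Str.zfill (PySem.Int.toStr 0) ((0 : Nat) : Int) = "0" := by decide
  simp only [hcand]
  have htl : ("0" : String).toList = ['0'] := by decide
  rw [htl, sbA_loop]

theorem sb_ok0_iff (gs : List (String × Int)) :
    sbA_ok ['0'] gs = true
      ↔ ∀ p ∈ gs, p.2 = (if p.1.toList[0]? = some '0' then (1 : Int) else 0) := by
  rw [sbA_ok_iff]
  apply forall_congr'
  intro p
  apply imp_congr_right
  intro _
  rw [sbCnt_singleton]
  exact eq_comm

theorem sb_main (gs : List (String × Int)) (hpre : gs ≠ []) (hnd : ¬ D_solve_bruteforce gs) :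
    solve_bruteforce gs = solve_bruteforce_alt gs := by
  obtain ⟨p0, rest, rfl⟩ : ∃ p0 rest, gs = p0 :: rest := by
    cases gs with
    | nil => exact absurd rfl hpre
    | cons a t => exact ⟨a, t, rfl⟩
  by_cases hL : p0.1.toList.length = 0
  · have h0 : p0.1.toList = [] := List.length_eq_zero_iff.1 hL
    rw [sb_A_L0 p0 rest h0, sb_alt_L0 p0 rest h0]
    have hs : p0.1 = "" := by
      have := congrArg String.ofList h0
      rwa [String.ofList_toList] at this
    have hok : sbA_ok ['0'] (p0 :: rest) ≠ true := by
      intro hok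
      exact hnd ⟨List.cons_ne_nil _ _, by simpa using hs, (sb_ok0_iff _).1 hok⟩
    rw [if_neg hok]
  · have hLpos : 0 < p0.1.toList.length := Nat.pos_of_ne_zero hL
    unfold solve_bruteforce solve_bruteforce_alt
    simp only [List.headD_cons]
    rw [sbA_char _ _ hLpos, sbB_char]
    cases h : (allStrings p0.1.toList.length).find? (fun cs => sbA_ok cs (p0 :: rest)) <;>
      simp

theorem sb_tight (gs : List (String × Int)) (hd : D_solve_bruteforce gs) :
    solve_bruteforce gs ≠ solve_bruteforce_alt gs := by
  obtain ⟨hne, hs, hall⟩ := hd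
  obtain ⟨p0, rest, rfl⟩ : ∃ p0 rest, gs = p0 :: rest := by
    cases gs with
    | nil => exact absurd rfl hne
    | cons a t => exact ⟨a, t, rfl⟩
  have h0 : p0.1.toList = [] := by
    simp only [List.headD_cons] at hs
    rw [hs]
    decide
  rw [sb_A_L0 p0 rest h0, sb_alt_L0 p0 rest h0]
  rw [if_pos ((sb_ok0_iff _).2 hall)]
  decide

-- ===== VERDICT (by name: the statement is the Claim_ definition above) =====
theorem solve_bruteforce_spec : Claim_unchanged_solve_bruteforce := by
  unfold Claim_unchanged_solve_bruteforce
  intro gs _ hpre hnd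
  exact sb_main gs hpre hnd

theorem solve_bruteforce_changed : Claim_changed_solve_bruteforce := by
  unfold Claim_changed_solve_bruteforce; decide

theorem solve_bruteforce_tight : Claim_exact_solve_bruteforce := by
  unfold Claim_exact_solve_bruteforce
  intro gs _ _ hd
  exact sb_tight gs hd
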